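-- pv_equiv track=rewrite | github.com/adamczycha/BabyGPT | src/sampler.py | drop_last_in_every_document_stream
-- ===== SOURCE A (Python) =====
-- def drop_last_in_every_document_stream(
-- 	document_indices: list[tuple[int, int]], ddp_world_size: int, mini_batch: int, block_size: int
-- ) -> list[tuple[int, int]]:
-- 	doc_length = lambda x: x[1] - x[0]
-- 	length_data_per_rank: list[int] = []
-- 	# calculate length for every stream
-- 	for rank in range(ddp_world_size):
-- 		documents_ranges = list(document_indices[rank::ddp_world_size])
-- 		length_data_per_rank.append(sum(map(doc_length, documents_ranges)))
-- 	max_token_length = min(length_data_per_rank) - (min(length_data_per_rank) % (mini_batch * block_size))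
-- 	index_remove = []
-- 	# drop or shorten documents to fit perfectly into mini_batch * block_size
-- 	for rank in range(ddp_world_size):
-- 		indices = list(range(rank, len(document_indices), ddp_world_size))
-- 		drop_tokens = 0
-- 		for idx in indices[::-1]:
--
-- 			drop_tokens += doc_length(document_indices[idx])
--
-- 			if length_data_per_rank[rank] - drop_tokens <= max_token_length:
-- 				start, end = document_indices[idx]
-- 				new_steam_length = (length_data_per_rank[rank] - drop_tokens)
-- 				lacking_tokens = max_token_length - new_steam_length
-- 				end = start + lacking_tokens
-- 				document_indices[idx] = (start, end)
-- 				break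
-- 			else:
-- 				index_remove.append(idx)
-- 	for idx in sorted(index_remove, reverse=True):
-- 		del document_indices[idx]
-- 	return document_indices
-- ===== SOURCE B (Python) =====
-- def drop_last_in_every_document_stream(
--     document_indices: list[tuple[int, int]], ddp_world_size: int, mini_batch: int, block_size: int
-- ) -> list[tuple[int, int]]:
--     doc_length = lambda x: x[1] - x[0]
--     length_data_per_rank: list[int] = []
--     for rank in range(ddp_world_size):
--         length_data_per_rank.append(sum(map(doc_length, document_indices[rank::ddp_world_size])))
--     m = min(length_data_per_rank)
--     max_token_length = m - m % (mini_batch * block_size)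
--     remove = set()
--     replace = {}
--     for rank in range(ddp_world_size):
--         indices = list(range(rank, len(document_indices), ddp_world_size))
--         # forward scan: cutoff = last document whose preceding token count fits the budget
--         running = 0
--         cut = None
--         cut_before = 0
--         for idx in indices:
--             if running <= max_token_length:
--                 cut, cut_before = idx, running
--             running += doc_length(document_indices[idx])
--         if cut is None:
--             remove.update(indices)
--         else:
--             start = document_indices[cut][0]
--             replace[cut] = (start, start + max_token_length - cut_before)
--             remove.update(i for i in indices if i > cut)
--     return [replace.get(i, doc) for i, doc in enumerate(document_indices) if i not in remove]
-- ===== Notes on version B (the rewrite author's own statement) =====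
-- stated objective: alternative
-- what changed: Phase 2 is redone as a forward prefix-sum scan per rank that picks the cutoff document directly (instead of A's backward break-scan with a running drop counter), collecting a removal set and a replacement dict, and the result is built by one comprehension over the original list instead of in-place trimming plus descending index deletes; B does not mutate its argument.
import Mathlib
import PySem

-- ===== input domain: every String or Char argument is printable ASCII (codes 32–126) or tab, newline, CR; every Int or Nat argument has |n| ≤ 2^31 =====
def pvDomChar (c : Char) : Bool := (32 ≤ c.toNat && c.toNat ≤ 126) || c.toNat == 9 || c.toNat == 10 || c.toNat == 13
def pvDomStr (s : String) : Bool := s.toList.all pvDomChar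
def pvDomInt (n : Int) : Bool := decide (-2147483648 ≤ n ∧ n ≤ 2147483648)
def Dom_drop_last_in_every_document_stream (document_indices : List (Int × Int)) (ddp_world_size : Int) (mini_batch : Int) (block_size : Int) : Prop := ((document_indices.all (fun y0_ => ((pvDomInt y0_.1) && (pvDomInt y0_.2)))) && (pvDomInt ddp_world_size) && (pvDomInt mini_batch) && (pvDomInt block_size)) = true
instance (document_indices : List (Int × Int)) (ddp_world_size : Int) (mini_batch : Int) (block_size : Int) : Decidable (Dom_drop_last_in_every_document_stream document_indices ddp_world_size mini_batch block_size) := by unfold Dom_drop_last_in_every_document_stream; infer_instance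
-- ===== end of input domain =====

-- B replaces A's in-place backward break-scan and descending deletes by a forward prefix
-- scan per rank plus a removal set / replacement dict and one output comprehension
-- (objective: alternative decomposition; A mutates its argument, B does not — the
-- equivalence proved here is about the RETURN value only).

-- ===== PORT A =====

-- doc_length = lambda x: x[1] - x[0]   (helper shared verbatim by both Pythons)
def pvDocLen (x : Int × Int) : Int := x.2 - x.1

-- phase 1 (identical lines in Source A and Source B): per-rank total token length via stride slices
def pvLengths (docs : List (Int × Int)) (w : Int) : List Int :=
  (PySem.List.pyRange 0 w 1).foldl
    (fun acc rank =>
      acc ++ [(((PySem.List.slice? docs (some rank) none w).getD []).map pvDocLen).sum])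
    []

-- inner `for idx in indices[::-1]: ... break` loop of A, with state (docs, index_remove, drop_tokens)
def pvInnerA (total maxTok : Int) : List Int → List (Int × Int) × List Int × Int → List (Int × Int) × List Int
  | [], (docs, rem, _) => (docs, rem)
  | idx :: rest, (docs, rem, drop) =>
    let d := drop + pvDocLen (PySem.List.pyGetD docs idx (0, 0))
    if total - d ≤ maxTok then
      let se := PySem.List.pyGetD docs idx (0, 0)
      let newStreamLength := total - d
      let lacking := maxTok - newStreamLength
      (PySem.List.pySetD docs idx (se.1, se.1 + lacking), rem)
    else
      pvInnerA total maxTok rest (docs, rem ++ [idx], d)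

def drop_last_in_every_document_stream (document_indices : List (Int × Int)) (ddp_world_size : Int) (mini_batch : Int) (block_size : Int) : List (Int × Int) :=
  let lengths := pvLengths document_indices ddp_world_size
  match PySem.List.min? lengths (fun x => x) with
  | none => []        -- Python: min([]) raises ValueError here (ddp_world_size < 1, outside Pre_)
  | some mn =>
    let maxTok := mn - PySem.Int.mod mn (mini_batch * block_size)
    let st :=
      (PySem.List.pyRange 0 ddp_world_size 1).foldl
        (fun (st : List (Int × Int) × List Int) rank =>
          let indices := PySem.List.pyRange rank (st.1.length : Int) ddp_world_size
          pvInnerA (PySem.List.pyGetD lengths rank 0) maxTok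
            ((PySem.List.slice? indices none none (-1)).getD []) (st.1, st.2, 0))
        (document_indices, [])
    -- `del document_indices[idx]` for idx descending; idx is always nonneg and in range here,
    -- where eraseIdx idx.toNat is exact
    (PySem.List.sorted st.2 (fun x => x) true).foldl (fun ds idx => ds.eraseIdx idx.toNat) st.1

-- ===== PORT B =====
def drop_last_in_every_document_stream_alt (document_indices : List (Int × Int)) (ddp_world_size : Int) (mini_batch : Int) (block_size : Int) : List (Int × Int) :=
  let lengths := pvLengths document_indices ddp_world_size
  match PySem.List.min? lengths (fun x => x) with
  | none => []        -- Python: min([]) raises ValueError here (ddp_world_size < 1, outside Pre_)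
  | some m =>
    let maxTok := m - PySem.Int.mod m (mini_batch * block_size)
    let st :=
      (PySem.List.pyRange 0 ddp_world_size 1).foldl
        (fun (st : PySem.Set Int × PySem.Dict Int (Int × Int)) rank =>
          let indices := PySem.List.pyRange rank (document_indices.length : Int) ddp_world_size
          -- forward scan: cutoff = last document whose preceding token count fits the budget
          let scanRes := indices.foldl
            (fun (acc : Int × Option (Int × Int)) idx =>
              (acc.1 + pvDocLen (PySem.List.pyGetD document_indices idx (0, 0)),
               if acc.1 ≤ maxTok then some (idx, acc.1) else acc.2))
            (0, none)
          match scanRes.2 with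
          | none => (PySem.Set.update st.1 indices, st.2)
          | some (cut, cutBefore) =>
            let start := (PySem.List.pyGetD document_indices cut (0, 0)).1
            (PySem.Set.update st.1 (indices.filter (fun i => cut < i)),
             st.2.insert cut (start, start + maxTok - cutBefore)))
        (PySem.Set.empty, PySem.Dict.empty)
    (PySem.List.enumerate document_indices 0).filterMap
      (fun p => if PySem.Set.contains st.1 p.1 then none else some (st.2.getD p.1 p.2))

-- ===== PRECONDITION & SPEC =====
-- Pre_ excludes exactly the inputs where Python A raises: ddp_world_size < 1 makes
-- min([]) raise ValueError, and mini_batch * block_size == 0 makes % raise ZeroDivisionError.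
def Pre_drop_last_in_every_document_stream (document_indices : List (Int × Int)) (ddp_world_size : Int) (mini_batch : Int) (block_size : Int) : Prop :=
  1 ≤ ddp_world_size ∧ mini_batch * block_size ≠ 0
instance (document_indices : List (Int × Int)) (ddp_world_size : Int) (mini_batch : Int) (block_size : Int) : Decidable (Pre_drop_last_in_every_document_stream document_indices ddp_world_size mini_batch block_size) := by unfold Pre_drop_last_in_every_document_stream; infer_instance

def pvWitness_drop_last_in_every_document_stream : (List (Int × Int)) × Int × Int × Int :=
  ([(0, 4), (0, 5), (4, 8), (5, 9)], 2, 1, 2)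

def Spec_drop_last_in_every_document_stream (document_indices : List (Int × Int)) (ddp_world_size : Int) (mini_batch : Int) (block_size : Int) (out : List (Int × Int)) : Prop := out = drop_last_in_every_document_stream_alt document_indices ddp_world_size mini_batch block_size
instance (document_indices : List (Int × Int)) (ddp_world_size : Int) (mini_batch : Int) (block_size : Int) (out : List (Int × Int)) : Decidable (Spec_drop_last_in_every_document_stream document_indices ddp_world_size mini_batch block_size out) := by unfold Spec_drop_last_in_every_document_stream; infer_instance

-- ===== CLAIM (what is proved, stated in full; the proofs are below) =====
def Claim_equal_drop_last_in_every_document_stream : Prop := ∀ (document_indices : List (Int × Int)) (ddp_world_size : Int) (mini_batch : Int) (block_size : Int), Dom_drop_last_in_every_document_stream document_indices ddp_world_size mini_batch block_size → Pre_drop_last_in_every_document_stream document_indices ddp_world_size mini_batch block_size → Spec_drop_last_in_every_document_stream document_indices ddp_world_size mini_batch block_size (drop_last_in_every_document_stream document_indices ddp_world_size mini_batch block_size)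

-- ===== LEMMAS AND PROOFS =====

-- token length of document i of `docs` (reads like both Pythons' doc_length(docs[idx]))
def pvL (docs : List (Int × Int)) (i : Int) : Int := pvDocLen (PySem.List.pyGetD docs i (0, 0))

def pvSumL (docs : List (Int × Int)) (p : List Int) : Int := (p.map (pvL docs)).sum

-- canonical per-rank scan: (last index whose preceding-token count fits (with that count), removed tail)
def pvScan (docs : List (Int × Int)) (M : Int) : Int → List Int → Option (Int × Int) × List Int
  | _, [] => (none, [])
  | acc, i :: rest =>
    match pvScan docs M (acc + pvL docs i) rest with
    | (some c, rm) => (some c, rm)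
    | (none, rm) => if acc ≤ M then (some (i, acc), rm) else (none, i :: rm)

def pvTrim (docs : List (Int × Int)) (M c cb : Int) : Int × Int :=
  ((PySem.List.pyGetD docs c (0, 0)).1, (PySem.List.pyGetD docs c (0, 0)).1 + (M - cb))

def pvIdxs (docs : List (Int × Int)) (w r : Int) : List Int :=
  PySem.List.pyRange r (docs.length : Int) w

def pvCut (docs : List (Int × Int)) (M w r : Int) : Option (Int × Int) :=
  (pvScan docs M 0 (pvIdxs docs w r)).1

def pvRm (docs : List (Int × Int)) (M w r : Int) : List Int :=
  (pvScan docs M 0 (pvIdxs docs w r)).2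

def pvDocsAfter (docs : List (Int × Int)) (M w : Int) (rs : List Int) : List (Int × Int) :=
  rs.foldl (fun ds r => match pvCut docs M w r with
    | some (c, cb) => PySem.List.pySetD ds c (pvTrim docs M c cb)
    | none => ds) docs

def pvRemAfter (docs : List (Int × Int)) (M w : Int) (rs : List Int) : List Int :=
  rs.foldl (fun rem r => rem ++ (pvRm docs M w r).reverse) []

def pvRemoveAfter (docs : List (Int × Int)) (M w : Int) (rs : List Int) : List Int :=
  rs.foldl (fun s r => s ++ pvRm docs M w r) []

def pvReplAfter (docs : List (Int × Int)) (M w : Int) (rs : List Int) : PySem.Dict Int (Int × Int) :=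
  rs.foldl (fun d r => match pvCut docs M w r with
    | some (c, cb) => d.insert c (pvTrim docs M c cb)
    | none => d) PySem.Dict.empty

theorem pvDocsAfter_snoc (docs : List (Int × Int)) (M w : Int) (rs : List Int) (r : Int) :
    pvDocsAfter docs M w (rs ++ [r]) =
      (match pvCut docs M w r with
       | some (c, cb) => PySem.List.pySetD (pvDocsAfter docs M w rs) c (pvTrim docs M c cb)
       | none => pvDocsAfter docs M w rs) := by
  unfold pvDocsAfter
  rw [List.foldl_append, List.foldl_cons, List.foldl_nil]

theorem pvRemAfter_snoc (docs : List (Int × Int)) (M w : Int) (rs : List Int) (r : Int) :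
    pvRemAfter docs M w (rs ++ [r]) = pvRemAfter docs M w rs ++ (pvRm docs M w r).reverse := by
  unfold pvRemAfter
  rw [List.foldl_append, List.foldl_cons, List.foldl_nil]

theorem pvRemoveAfter_snoc (docs : List (Int × Int)) (M w : Int) (rs : List Int) (r : Int) :
    pvRemoveAfter docs M w (rs ++ [r]) = pvRemoveAfter docs M w rs ++ pvRm docs M w r := by
  unfold pvRemoveAfter
  rw [List.foldl_append, List.foldl_cons, List.foldl_nil]

theorem pvReplAfter_snoc (docs : List (Int × Int)) (M w : Int) (rs : List Int) (r : Int) :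
    pvReplAfter docs M w (rs ++ [r]) =
      (match pvCut docs M w r with
       | some (c, cb) => (pvReplAfter docs M w rs).insert c (pvTrim docs M c cb)
       | none => pvReplAfter docs M w rs) := by
  unfold pvReplAfter
  rw [List.foldl_append, List.foldl_cons, List.foldl_nil]

theorem pvSumL_append (docs : List (Int × Int)) (p : List Int) (x : Int) :
    pvSumL docs (p ++ [x]) = pvSumL docs p + pvL docs x := by
  simp [pvSumL]

theorem pvScan_append (docs : List (Int × Int)) (M acc : Int) (p : List Int) (x : Int) :
    pvScan docs M acc (p ++ [x]) =
      if acc + pvSumL docs p ≤ M then (some (x, acc + pvSumL docs p), [])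
      else ((pvScan docs M acc p).1, (pvScan docs M acc p).2 ++ [x]) := by
  induction p generalizing acc with
  | nil => simp [pvScan, pvSumL]
  | cons i t ih =>
    simp only [List.cons_append, pvScan, ih (acc + pvL docs i)]
    have hs : acc + pvL docs i + pvSumL docs t = acc + pvSumL docs (i :: t) := by
      simp [pvSumL]; ring
    rw [hs]
    by_cases hfit : acc + pvSumL docs (i :: t) ≤ M
    · simp [hfit]
    · simp only [if_neg hfit]
      cases hsc : pvScan docs M (acc + pvL docs i) t with
      | mk c rm =>
        cases c with
        | some c => simp [pvScan, hsc]
        | none => by_cases hacc : acc ≤ M <;> simp [pvScan, hsc, hacc]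


theorem pvScan_cut_mem (docs : List (Int × Int)) (M : Int) (p : List Int) (acc c cb : Int)
    (h : (pvScan docs M acc p).1 = some (c, cb)) : c ∈ p := by
  induction p generalizing acc with
  | nil => simp [pvScan] at h
  | cons i t ih =>
    simp only [pvScan] at h
    cases hsc : pvScan docs M (acc + pvL docs i) t with
    | mk c' rm =>
      rw [hsc] at h
      cases c' with
      | some c' =>
        have h' : c' = (c, cb) := Option.some.inj h
        exact List.mem_cons_of_mem _ (ih (acc + pvL docs i) (by rw [hsc, h']))
      | none =>
        by_cases hacc : acc ≤ M
        · simp only [if_pos hacc] at h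
          have h' : (i, acc) = (c, cb) := Option.some.inj h
          simp [← (Prod.mk.injEq .. ▸ h' : i = c ∧ acc = cb).1]
        · simp only [if_neg hacc] at h; exact absurd h (by simp)


theorem pvScan_rm_sublist (docs : List (Int × Int)) (M acc : Int) (p : List Int) :
    (pvScan docs M acc p).2.Sublist p := by
  induction p generalizing acc with
  | nil => simp [pvScan]
  | cons i t ih =>
    simp only [pvScan]
    cases hsc : pvScan docs M (acc + pvL docs i) t with
    | mk c' rm =>
      have hsub : rm.Sublist t := by have := ih (acc + pvL docs i); rw [hsc] at this; exact this
      cases c' with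
      | some c' => exact hsub.cons _
      | none =>
        by_cases hacc : acc ≤ M
        · simp only [if_pos hacc]; exact hsub.cons _
        · simp only [if_neg hacc]; exact hsub.cons₂ _


theorem pvScan_rm_char (docs : List (Int × Int)) (M acc : Int) (p : List Int)
    (hp : p.Pairwise (· < ·)) :
    (pvScan docs M acc p).2 =
      match (pvScan docs M acc p).1 with
      | some (c, _) => p.filter (fun i => decide (c < i))
      | none => p := by
  induction p generalizing acc with
  | nil => simp [pvScan]
  | cons i t ih =>
    have hp' := (List.pairwise_cons.mp hp).2
    have hhead := (List.pairwise_cons.mp hp).1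
    simp only [pvScan]
    cases hsc : pvScan docs M (acc + pvL docs i) t with
    | mk c' rm =>
      cases c' with
      | some c' =>
        obtain ⟨c, cb⟩ := c'
        have ihrm : rm = t.filter (fun j => decide (c < j)) := by
          have := ih (acc + pvL docs i) hp'; rw [hsc] at this; exact this
        have hcmem : c ∈ t := pvScan_cut_mem docs M t (acc + pvL docs i) c cb (by rw [hsc])
        have hic : ¬ (c < i) := not_lt.mpr (le_of_lt (hhead c hcmem))
        simp [ihrm, List.filter_cons, hic]
      | none =>
        have ihrm : rm = t := by
          have := ih (acc + pvL docs i) hp'; rw [hsc] at this; exact this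
        by_cases hacc : acc ≤ M
        · simp only [if_pos hacc]
          have : t.filter (fun j => decide (i < j)) = t :=
            List.filter_eq_self.mpr (fun j hj => by simpa using hhead j hj)
          simp [ihrm, List.filter_cons, this]
        · simp [if_neg hacc, ihrm]


theorem pvScan_congr (docs docs' : List (Int × Int)) (M : Int) (p : List Int)
    (h : ∀ i ∈ p, PySem.List.pyGetD docs' i (0, 0) = PySem.List.pyGetD docs i (0, 0)) :
    ∀ acc, pvScan docs' M acc p = pvScan docs M acc p := by
  induction p with
  | nil => intro acc; rfl
  | cons i t ih =>
    intro acc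
    have hi : PySem.List.pyGetD docs' i (0, 0) = PySem.List.pyGetD docs i (0, 0) :=
      h i (List.mem_cons_self ..)
    have ht := ih (fun j hj => h j (List.mem_cons_of_mem _ hj))
    simp [pvScan, pvL, hi, ht]


theorem pvSumL_congr (docs docs' : List (Int × Int)) (p : List Int)
    (h : ∀ i ∈ p, PySem.List.pyGetD docs' i (0, 0) = PySem.List.pyGetD docs i (0, 0)) :
    pvSumL docs' p = pvSumL docs p := by
  unfold pvSumL
  congr 1
  exact List.map_congr_left (fun i hi => by simp [pvL, h i hi])


theorem pvFoldB_eq (docs : List (Int × Int)) (M : Int) (p : List Int) :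
    ∀ (a : Int) (c0 : Option (Int × Int)),
      p.foldl (fun (acc : Int × Option (Int × Int)) idx =>
          (acc.1 + pvDocLen (PySem.List.pyGetD docs idx (0, 0)),
           if acc.1 ≤ M then some (idx, acc.1) else acc.2)) (a, c0)
      = (a + pvSumL docs p, ((pvScan docs M a p).1).or c0) := by
  induction p with
  | nil => intro a c0; simp [pvSumL, pvScan]
  | cons i t ih =>
    intro a c0
    simp only [List.foldl_cons]
    rw [ih (a + pvDocLen (PySem.List.pyGetD docs i (0, 0))) _]
    have hsum : a + pvDocLen (PySem.List.pyGetD docs i (0, 0)) + pvSumL docs t = a + pvSumL docs (i :: t) := by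
      simp [pvSumL, pvL]; ring
    rw [hsum]
    congr 1
    simp only [pvScan, pvL]
    cases hsc : pvScan docs M (a + pvDocLen (PySem.List.pyGetD docs i (0, 0))) t with
    | mk c' rm =>
      have : pvScan docs M (a + pvL docs i) t = (c', rm) := by rw [← hsc]; rfl
      cases c' with
      | some c' => simp [this]
      | none => by_cases hacc : a ≤ M <;> simp [this, hacc]


theorem pvInnerA_char (docs' : List (Int × Int)) (total M : Int) (p : List Int) :
    ∀ (rem : List Int) (acc : Int),
      pvInnerA total M p.reverse (docs', rem, total - (acc + pvSumL docs' p)) =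
        (match pvScan docs' M acc p with
         | (some (c, cb), rm) => (PySem.List.pySetD docs' c (pvTrim docs' M c cb), rem ++ rm.reverse)
         | (none, rm) => (docs', rem ++ rm.reverse)) := by
  induction p using List.reverseRecOn with
  | nil => intro rem acc; simp [pvInnerA, pvScan]
  | append_singleton p x ih =>
    intro rem acc
    rw [List.reverse_append]
    simp only [List.reverse_cons, List.reverse_nil, List.nil_append, List.singleton_append]
    rw [pvScan_append]
    simp only [pvInnerA]
    have hd : total - (acc + pvSumL docs' (p ++ [x])) + pvDocLen (PySem.List.pyGetD docs' x (0, 0))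
        = total - (acc + pvSumL docs' p) := by
      rw [pvSumL_append]; simp [pvL]; ring
    rw [hd]
    by_cases hfit : acc + pvSumL docs' p ≤ M
    · have hcond : total - (total - (acc + pvSumL docs' p)) ≤ M := by omega
      simp only [if_pos hcond, if_pos hfit]
      have : total - (total - (acc + pvSumL docs' p)) = acc + pvSumL docs' p := by ring
      simp [pvTrim, this]
    · have hcond : ¬ (total - (total - (acc + pvSumL docs' p)) ≤ M) := by omega
      simp only [if_neg hcond, if_neg hfit]
      rw [ih (rem ++ [x]) acc]
      cases hsc : pvScan docs' M acc p with
      | mk c' rm =>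
        cases c' with
        | some c' => obtain ⟨c, cb⟩ := c'; simp
        | none => simp


theorem pvInnerA_char0 (docsp : List (Int × Int)) (total M : Int) (p : List Int)
    (rem : List Int) (h : pvSumL docsp p = total) :
    pvInnerA total M p.reverse (docsp, rem, 0) =
      (match pvScan docsp M 0 p with
       | (some (c, cb), rm) => (PySem.List.pySetD docsp c (pvTrim docsp M c cb), rem ++ rm.reverse)
       | (none, rm) => (docsp, rem ++ rm.reverse)) := by
  have e := pvInnerA_char docsp total M p rem 0
  rw [show total - (0 + pvSumL docsp p) = 0 by omega] at e
  exact e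

-- indexing/range facts
theorem pvIdxs_pairwise (docs : List (Int × Int)) (w r : Int) (hw : 0 < w) :
    (pvIdxs docs w r).Pairwise (· < ·) := by
  unfold pvIdxs
  rw [PySem.List.pyRange_of_pos _ _ hw]
  refine List.pairwise_map.mpr (List.Pairwise.imp ?_ List.pairwise_lt_range)
  intro a b hab
  have hab' : (a : Int) < (b : Int) := by exact_mod_cast hab
  nlinarith


theorem pvIdxs_mem (docs : List (Int × Int)) (w r i : Int) (hw : 0 < w) :
    i ∈ pvIdxs docs w r ↔ r ≤ i ∧ i < (docs.length : Int) ∧ w ∣ i - r := by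
  unfold pvIdxs
  exact PySem.List.mem_pyRange_iff_of_pos hw i


theorem pvIdxs_disjoint (docs : List (Int × Int)) (w r r' i : Int) (hw : 0 < w)
    (hr : 0 ≤ r ∧ r < w) (hr' : 0 ≤ r' ∧ r' < w) (hne : r ≠ r')
    (hi : i ∈ pvIdxs docs w r) : i ∉ pvIdxs docs w r' := by
  intro hi'
  rw [pvIdxs_mem docs w r i hw] at hi
  rw [pvIdxs_mem docs w r' i hw] at hi'
  obtain ⟨k, hk⟩ := hi.2.2
  obtain ⟨k', hk'⟩ := hi'.2.2
  have : w ∣ r - r' := ⟨k' - k, by linarith [hk, hk', mul_sub w k' k]⟩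
  rcases Int.lt_or_lt_of_ne (fun h => hne h) with h | h
  · have := Int.le_of_dvd (by omega) (dvd_neg.mpr this); omega
  · have := Int.le_of_dvd (by omega) this; omega


theorem pvGetD_pySetD_int (xs : List (Int × Int)) (c i : Int) (v d : Int × Int)
    (hc0 : 0 ≤ c) (hc : c < (xs.length : Int)) (hi : 0 ≤ i) :
    PySem.List.pyGetD (PySem.List.pySetD xs c v) i d = if i = c then v else PySem.List.pyGetD xs i d := by
  have hc' : c = ((c.toNat : Nat) : Int) := by omega
  have hi' : i = ((i.toNat : Nat) : Int) := by omega
  rw [hc', hi', PySem.List.pyGetD_pySetD_natCast xs c.toNat i.toNat v d (by omega)]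
  by_cases h : i = c
  · rw [if_pos (by omega), if_pos (by rw [← hc', ← hi', h])]
  · rw [if_neg (by omega), if_neg (by rw [← hc', ← hi']; exact h)]


-- the stride slice xs[r::w] reads exactly the documents at indices pvIdxs
theorem pvSlice_stride (docs : List (Int × Int)) (w r : Int) (hw : 0 < w) (hr : 0 ≤ r) :
    (PySem.List.slice? docs (some r) none w).getD [] =
      (pvIdxs docs w r).map (fun i => PySem.List.pyGetD docs i (0, 0)) := by
  have hw0 : ¬ (w = 0) := by omega
  have hwneg : ¬ (w < 0) := by omega
  have hrneg : ¬ (r < 0) := by omega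
  unfold pvIdxs
  rw [PySem.List.pyRange_of_pos _ _ hw]
  simp only [PySem.List.slice?, PySem.List.sliceIndices, if_neg hw0, if_neg hwneg, if_neg hrneg, if_pos hw]
  by_cases hrn : r < (docs.length : Int)
  · have hmin : min r (docs.length : Int) = r := min_eq_left (le_of_lt hrn)
    simp only [hmin, Option.getD_some, if_pos hrn]
    have hcnt : ∀ k ∈ List.range (((docs.length : Int) - r + w - 1) / w).toNat,
        docs[(r + w * (k : Int)).toNat]? = some (PySem.List.pyGetD docs (r + w * (k : Int)) (0, 0)) := by
      intro k hk
      have hk' : ((k : Int) + 1) * w ≤ (docs.length : Int) - r + w - 1 := by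
        have hkd : (k : Int) < ((docs.length : Int) - r + w - 1) / w := by
          have := List.mem_range.mp hk
          have h1 : (0 : Int) ≤ ((docs.length : Int) - r + w - 1) / w :=
            Int.ediv_nonneg (by omega) (by omega)
          omega
        have := (Int.le_ediv_iff_mul_le hw).mp hkd
        omega
      have hlt : r + w * (k : Int) < (docs.length : Int) := by nlinarith
      have hge : 0 ≤ r + w * (k : Int) := by positivity
      rw [PySem.List.pyGetD_eq_getElem docs (0, 0) hge hlt]
      exact List.getElem?_eq_getElem (by omega)
    rw [List.filterMap_congr (fun k hk => hcnt k hk)]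
    rw [show (fun k : Nat => some (PySem.List.pyGetD docs (r + w * (k : Int)) (0, 0)))
        = some ∘ (fun k : Nat => PySem.List.pyGetD docs (r + w * (k : Int)) (0, 0)) from rfl]
    rw [List.filterMap_eq_map, List.map_map]
    rfl
  · have hmin : min r (docs.length : Int) = (docs.length : Int) := min_eq_right (by omega)
    simp [hmin, if_neg hrn]


theorem pvFoldl_append_eq_map {α β : Type} (l : List α) (f : α → β) (a0 : List β) :
    l.foldl (fun acc x => acc ++ [f x]) a0 = a0 ++ l.map f := by
  induction l generalizing a0 with
  | nil => simp
  | cons x t ih => simp [ih]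

theorem pvLengths_get (docs : List (Int × Int)) (w r : Int) (hw : 0 < w) (hr0 : 0 ≤ r) (hr : r < w) :
    PySem.List.pyGetD (pvLengths docs w) r 0 = pvSumL docs (pvIdxs docs w r) := by
  unfold pvLengths
  rw [pvFoldl_append_eq_map, List.nil_append]
  rw [PySem.List.pyGetD_map_pyRange_of_nonneg _ w r 0 hr0 hr]
  rw [pvSlice_stride docs w r hw hr0]
  simp [pvSumL, pvL, List.map_map]
  rfl


-- docs-state after processing ranks rs agrees with the original at indices of an unprocessed rank
theorem pvDocsAfter_length (docs : List (Int × Int)) (M w : Int) (rs : List Int)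
    (hw : 0 < w) (hrs : ∀ r ∈ rs, 0 ≤ r ∧ r < w) :
    (pvDocsAfter docs M w rs).length = docs.length := by
  have aux : ∀ (rs : List Int) (ds : List (Int × Int)),
      ((rs.foldl (fun ds r => match pvCut docs M w r with
        | some (c, cb) => PySem.List.pySetD ds c (pvTrim docs M c cb)
        | none => ds) ds)).length = ds.length := by
    intro rs
    induction rs with
    | nil => intro ds; rfl
    | cons r t ih =>
      intro ds
      rw [List.foldl_cons]
      cases h : pvCut docs M w r with
      | none => rw [ih]
      | some c =>
        obtain ⟨c, cb⟩ := c
        rw [ih, PySem.List.length_pySetD]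
  exact aux rs docs


theorem pvDocsAfter_untouched (docs : List (Int × Int)) (M w : Int) (rs : List Int)
    (hw : 0 < w) (hrs : ∀ r' ∈ rs, 0 ≤ r' ∧ r' < w) (r : Int) (hr : 0 ≤ r ∧ r < w)
    (hnot : r ∉ rs) :
    ∀ i ∈ pvIdxs docs w r, PySem.List.pyGetD (pvDocsAfter docs M w rs) i (0, 0) = PySem.List.pyGetD docs i (0, 0) := by
  induction rs using List.reverseRecOn with
  | nil => intro i _; rfl
  | append_singleton rs r' ih =>
    intro i hi
    have hr' := hrs r' (by simp)
    have hrs' : ∀ x ∈ rs, 0 ≤ x ∧ x < w := fun x hx => hrs x (by simp [hx])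
    have hnotr : r ∉ rs := fun hx => hnot (by simp [hx])
    have hner : r ≠ r' := fun hx => hnot (by simp [hx])
    rw [pvDocsAfter_snoc]
    cases hc : pvCut docs M w r' with
    | none => exact ih hrs' hnotr i hi
    | some c =>
      obtain ⟨c, cb⟩ := c
      have hcmem : c ∈ pvIdxs docs w r' :=
        pvScan_cut_mem docs M (pvIdxs docs w r') 0 c cb hc
      have hine : i ≠ c := by
        intro he
        exact pvIdxs_disjoint docs w r r' i hw hr hr' hner hi (he ▸ hcmem)
      have hc0 : 0 ≤ c := le_trans hr'.1 ((pvIdxs_mem docs w r' c hw).mp hcmem).1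
      have hcn : c < ((pvDocsAfter docs M w rs).length : Int) := by
        rw [pvDocsAfter_length docs M w rs hw hrs']
        exact ((pvIdxs_mem docs w r' c hw).mp hcmem).2.1
      have hi0 : 0 ≤ i := le_trans hr.1 ((pvIdxs_mem docs w r i hw).mp hi).1
      rw [pvGetD_pySetD_int _ c i _ _ hc0 hcn hi0, if_neg hine]
      exact ih hrs' hnotr i hi

-- A's phase-2 fold over the first r ranks computes the canonical state
theorem pvPhase2A (docs : List (Int × Int)) (M w : Int) (hw : 0 < w) (r : Int) (hr : 0 ≤ r ∧ r ≤ w) :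
    ((PySem.List.pyRange 0 r 1).foldl
      (fun (st : List (Int × Int) × List Int) rank =>
        let indices := PySem.List.pyRange rank (st.1.length : Int) w
        pvInnerA (PySem.List.pyGetD (pvLengths docs w) rank 0) M
          ((PySem.List.slice? indices none none (-1)).getD []) (st.1, st.2, 0))
      (docs, []))
    = (pvDocsAfter docs M w (PySem.List.pyRange 0 r 1), pvRemAfter docs M w (PySem.List.pyRange 0 r 1)) := by
  obtain ⟨hr0, hrw⟩ := hr
  revert hrw
  induction r, hr0 using Int.le_induction with
  | base =>
    intro _
    rw [PySem.List.pyRange_one_eq_nil (le_refl 0), List.foldl_nil]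
    rfl
  | succ n hn ih =>
    intro hnw1
    have hnw : n ≤ w := by omega
    rw [PySem.List.pyRange_one_succ_right hn, List.foldl_append, ih hnw,
      List.foldl_cons, List.foldl_nil]
    have hrsmem : ∀ x ∈ PySem.List.pyRange 0 n 1, 0 ≤ x ∧ x < w := fun x hx => by
      have := PySem.List.mem_pyRange_one.mp hx; omega
    have hnmem : n ∉ PySem.List.pyRange 0 n 1 := fun hx => by
      have := PySem.List.mem_pyRange_one.mp hx; omega
    simp only [pvDocsAfter_length docs M w (PySem.List.pyRange 0 n 1) hw hrsmem]
    rw [show PySem.List.pyRange n (docs.length : Int) w = pvIdxs docs w n from rfl]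
    rw [PySem.List.slice?_none_none_neg_one, Option.getD_some]
    have hU := pvDocsAfter_untouched docs M w (PySem.List.pyRange 0 n 1) hw hrsmem n
      ⟨hn, by omega⟩ hnmem
    rw [pvLengths_get docs w n hw hn (by omega)]
    rw [pvInnerA_char0 _ _ M _ _ (pvSumL_congr docs _ (pvIdxs docs w n) hU)]
    rw [pvScan_congr docs _ M (pvIdxs docs w n) hU 0]
    rw [pvDocsAfter_snoc, pvRemAfter_snoc]
    unfold pvCut pvRm
    cases hsc : pvScan docs M 0 (pvIdxs docs w n) with
    | mk copt rm =>
      cases copt with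
      | none => rfl
      | some c =>
        obtain ⟨c, cb⟩ := c
        have hcmem : c ∈ pvIdxs docs w n :=
          pvScan_cut_mem docs M (pvIdxs docs w n) 0 c cb (by rw [hsc])
        simp only [pvTrim, hU c hcmem]


theorem pvSetUpdate_append (s : PySem.Set Int) (l : List Int)
    (hdisj : ∀ x ∈ l, x ∉ s) (hnd : l.Nodup) : PySem.Set.update s l = s ++ l := by
  induction l generalizing s with
  | nil => simp [PySem.Set.update]
  | cons x t ih =>
    have hx : x ∉ s := hdisj x (List.mem_cons_self ..)
    have hs : PySem.Set.update s (x :: t) = PySem.Set.update (s ++ [x]) t := by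
      simp [PySem.Set.update, PySem.Set.add_of_not_mem hx]
    rw [hs, ih (s ++ [x]) ?_ (List.nodup_cons.mp hnd).2]
    · simp
    · intro y hy
      simp only [List.mem_append, List.mem_singleton]
      rintro (h | h)
      · exact hdisj y (List.mem_cons_of_mem _ hy) h
      · exact (List.nodup_cons.mp hnd).1 (h ▸ hy)


theorem pvRemoveAfter_mem (docs : List (Int × Int)) (M w : Int) (rs : List Int) (i : Int)
    (h : i ∈ pvRemoveAfter docs M w rs) : ∃ r ∈ rs, i ∈ pvIdxs docs w r := by
  induction rs using List.reverseRecOn with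
  | nil => simp [pvRemoveAfter] at h
  | append_singleton rs r ih =>
    unfold pvRemoveAfter at h
    rw [List.foldl_append, List.foldl_cons, List.foldl_nil] at h
    rcases List.mem_append.mp h with h | h
    · obtain ⟨r', hr', hr'i⟩ := ih h
      exact ⟨r', by simp [hr'], hr'i⟩
    · exact ⟨r, by simp, (pvScan_rm_sublist docs M 0 (pvIdxs docs w r)).subset h⟩


theorem pvRemAfter_perm (docs : List (Int × Int)) (M w : Int) (rs : List Int) :
    (pvRemAfter docs M w rs).Perm (pvRemoveAfter docs M w rs) := by
  induction rs using List.reverseRecOn with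
  | nil => rfl
  | append_singleton rs r ih =>
    unfold pvRemAfter pvRemoveAfter
    rw [List.foldl_append, List.foldl_append, List.foldl_cons, List.foldl_cons,
      List.foldl_nil, List.foldl_nil]
    exact List.Perm.append ih ((pvRm docs M w r).reverse_perm)


-- B's phase-2 fold over the first r ranks computes the canonical state
theorem pvPhase2B (docs : List (Int × Int)) (M w : Int) (hw : 0 < w) (r : Int) (hr : 0 ≤ r ∧ r ≤ w) :
    ((PySem.List.pyRange 0 r 1).foldl
      (fun (st : PySem.Set Int × PySem.Dict Int (Int × Int)) rank =>
        let indices := PySem.List.pyRange rank (docs.length : Int) w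
        let scanRes := indices.foldl
          (fun (acc : Int × Option (Int × Int)) idx =>
            (acc.1 + pvDocLen (PySem.List.pyGetD docs idx (0, 0)),
             if acc.1 ≤ M then some (idx, acc.1) else acc.2))
          (0, none)
        match scanRes.2 with
        | none => (PySem.Set.update st.1 indices, st.2)
        | some (cut, cutBefore) =>
          let start := (PySem.List.pyGetD docs cut (0, 0)).1
          (PySem.Set.update st.1 (indices.filter (fun i => cut < i)),
           st.2.insert cut (start, start + M - cutBefore)))
      (PySem.Set.empty, PySem.Dict.empty))
    = (pvRemoveAfter docs M w (PySem.List.pyRange 0 r 1), pvReplAfter docs M w (PySem.List.pyRange 0 r 1)) := by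
  obtain ⟨hr0, hrw⟩ := hr
  revert hrw
  induction r, hr0 using Int.le_induction with
  | base =>
    intro _
    rw [PySem.List.pyRange_one_eq_nil (le_refl 0), List.foldl_nil]
    rfl
  | succ n hn ih =>
    intro hnw1
    have hnw : n ≤ w := by omega
    rw [PySem.List.pyRange_one_succ_right hn, List.foldl_append, ih hnw,
      List.foldl_cons, List.foldl_nil]
    have hrsmem : ∀ x ∈ PySem.List.pyRange 0 n 1, 0 ≤ x ∧ x < w := fun x hx => by
      have := PySem.List.mem_pyRange_one.mp hx; omega
    simp only []
    rw [show PySem.List.pyRange n (docs.length : Int) w = pvIdxs docs w n from rfl]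
    have hpair := pvIdxs_pairwise docs w n hw
    have hnd : (pvIdxs docs w n).Nodup := hpair.imp (fun h => ne_of_lt h)
    have hdisj : ∀ x ∈ pvIdxs docs w n, x ∉ pvRemoveAfter docs M w (PySem.List.pyRange 0 n 1) := by
      intro x hx hmem
      obtain ⟨rp, hrp, hxrp⟩ := pvRemoveAfter_mem docs M w _ x hmem
      have hb := PySem.List.mem_pyRange_one.mp hrp
      exact pvIdxs_disjoint docs w n rp x hw ⟨hn, by omega⟩ ⟨hb.1, by omega⟩
        (by omega) hx hxrp
    rw [pvFoldB_eq docs M (pvIdxs docs w n) 0 none]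
    simp only [Option.or_none]
    rw [pvRemoveAfter_snoc, pvReplAfter_snoc]
    unfold pvCut pvRm
    have hrm := pvScan_rm_char docs M 0 (pvIdxs docs w n) hpair
    cases hsc : (pvScan docs M 0 (pvIdxs docs w n)).1 with
    | none =>
      rw [hsc] at hrm
      simp only []
      rw [pvSetUpdate_append _ _ hdisj hnd]
      simp only [hrm]
    | some c =>
      obtain ⟨c, cb⟩ := c
      rw [hsc] at hrm
      simp only []
      have hsubl : (List.filter (fun i => decide (c < i)) (pvIdxs docs w n)).Sublist (pvIdxs docs w n) :=
        List.filter_sublist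
      rw [pvSetUpdate_append _ _ (fun x hx => hdisj x (hsubl.subset hx)) (hnd.sublist hsubl)]
      simp only [hrm]
      have htr : pvTrim docs M c cb =
          ((PySem.List.pyGetD docs c (0, 0)).1, (PySem.List.pyGetD docs c (0, 0)).1 + M - cb) := by
        unfold pvTrim; congr 1; ring
      rw [htr]


-- kept entries: trimmed list vs replacement dict
theorem pvValue_eq (docs : List (Int × Int)) (M w : Int) (hw : 0 < w) (rs : List Int)
    (hrs : ∀ r ∈ rs, 0 ≤ r ∧ r < w) (i : Int) (hi0 : 0 ≤ i) (hin : i < (docs.length : Int)) :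
    PySem.List.pyGetD (pvDocsAfter docs M w rs) i (0, 0) =
      (pvReplAfter docs M w rs).getD i (PySem.List.pyGetD docs i (0, 0)) := by
  induction rs using List.reverseRecOn with
  | nil => simp [pvDocsAfter, pvReplAfter, PySem.Dict.getD_empty]
  | append_singleton rs r ih =>
    have hr := hrs r (by simp)
    have hrs2 : ∀ x ∈ rs, 0 ≤ x ∧ x < w := fun x hx => hrs x (by simp [hx])
    rw [pvDocsAfter_snoc, pvReplAfter_snoc]
    cases hc : pvCut docs M w r with
    | none => exact ih hrs2
    | some c =>
      obtain ⟨c, cb⟩ := c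
      have hcmem : c ∈ pvIdxs docs w r :=
        pvScan_cut_mem docs M (pvIdxs docs w r) 0 c cb hc
      have hc0 : 0 ≤ c := le_trans hr.1 ((pvIdxs_mem docs w r c hw).mp hcmem).1
      have hcn : c < ((pvDocsAfter docs M w rs).length : Int) := by
        rw [pvDocsAfter_length docs M w rs hw hrs2]
        exact ((pvIdxs_mem docs w r c hw).mp hcmem).2.1
      rw [pvGetD_pySetD_int _ c i _ _ hc0 hcn hi0, PySem.Dict.getD_insert]
      by_cases hie : i = c
      · rw [if_pos hie, if_pos hie]
      · rw [if_neg hie, if_neg hie]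
        exact ih hrs2


theorem pvMem_enumerate_bounds {alpha : Type} (xs : List alpha) (s : Int) (p : Int × alpha)
    (h : p ∈ PySem.List.enumerate xs s) : s ≤ p.1 ∧ p.1 < s + (xs.length : Int) := by
  induction xs generalizing s with
  | nil => simp [PySem.List.enumerate] at h
  | cons x t ih =>
    simp only [PySem.List.enumerate] at h
    rcases List.mem_cons.mp h with h | h
    · subst h
      refine ⟨le_refl _, ?_⟩
      simp only [List.length_cons]
      push_cast
      omega
    · have := ih (s + 1) h
      simp only [List.length_cons] at this ⊢
      push_cast at this ⊢
      omega


theorem pvFilterMap_keep_all {alpha : Type} (xs : List alpha) (s : Int) (Q : Int → Prop)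
    [DecidablePred Q] (h : ∀ p ∈ PySem.List.enumerate xs s, ¬ Q p.1) :
    (PySem.List.enumerate xs s).filterMap (fun p => if Q p.1 then none else some p.2) = xs := by
  induction xs generalizing s with
  | nil => simp [PySem.List.enumerate]
  | cons x t ih =>
    simp only [PySem.List.enumerate, List.filterMap_cons]
    have hx : ¬ Q s := h (s, x) (by simp [PySem.List.enumerate])
    simp only [if_neg hx]
    rw [ih (s + 1) (fun p hp => h p (by simp [PySem.List.enumerate, hp]))]

-- deleting at strictly descending, in-range indices keeps exactly the entries whose index is not listed
theorem pvEraseDesc (ks : List Int) :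
    ∀ (ds : List (Int × Int)), ks.Pairwise (fun a b => b < a) →
      (∀ k ∈ ks, 0 ≤ k ∧ k < (ds.length : Int)) →
      ks.foldl (fun d i => d.eraseIdx i.toNat) ds =
        (PySem.List.enumerate ds 0).filterMap (fun p => if p.1 ∈ ks then none else some p.2) := by
  induction ks with
  | nil =>
    intro ds _ _
    rw [List.foldl_nil]
    exact (pvFilterMap_keep_all ds 0 (fun i => i ∈ ([] : List Int)) (by simp)).symm
  | cons k rest ih =>
    intro ds hpw hin
    have hk := hin k (List.mem_cons_self ..)
    have hrest_lt : ∀ x ∈ rest, x < k := fun x hx => (List.pairwise_cons.mp hpw).1 x hx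
    have hpw2 := (List.pairwise_cons.mp hpw).2
    have hknlt : k.toNat < ds.length := by omega
    rw [List.foldl_cons]
    rw [ih (ds.eraseIdx k.toNat) hpw2 ?bounds]
    case bounds =>
      intro x hx
      have hxb := hin x (List.mem_cons_of_mem _ hx)
      have hxk := hrest_lt x hx
      refine ⟨hxb.1, ?_⟩
      rw [List.length_eraseIdx, if_pos hknlt]
      omega
    have hds : ds = ds.take k.toNat ++ ds[k.toNat] :: ds.drop (k.toNat + 1) := by
      conv_lhs => rw [← List.take_append_drop k.toNat ds]
      rw [List.drop_eq_getElem_cons hknlt]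
    rw [List.eraseIdx_eq_take_drop_succ]
    conv_rhs => rw [hds]
    rw [PySem.List.enumerate_append, PySem.List.enumerate_append,
      List.filterMap_append, List.filterMap_append]
    have hlt : (ds.take k.toNat).length = k.toNat := by
      rw [List.length_take]; omega
    congr 1
    · apply List.filterMap_congr
      intro p hp
      have hb := pvMem_enumerate_bounds _ _ _ hp
      rw [hlt] at hb
      have hne : p.1 ≠ k := by omega
      simp [List.mem_cons, hne]
    · simp only [PySem.List.enumerate, List.filterMap_cons, hlt]
      have hkk : (0 : Int) + (k.toNat : Int) = k := by omega
      rw [hkk]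
      rw [if_pos (List.mem_cons_self ..)]
      rw [pvFilterMap_keep_all (ds.drop (k.toNat + 1)) k (fun i => i ∈ rest) ?keepl]
      rw [pvFilterMap_keep_all (ds.drop (k.toNat + 1)) (k + 1) (fun i => i ∈ k :: rest) ?keepr]
      case keepl =>
        intro p hp hmem
        have hb := pvMem_enumerate_bounds _ _ _ hp
        have := hrest_lt p.1 hmem
        omega
      case keepr =>
        intro p hp hmem
        have hb := pvMem_enumerate_bounds _ _ _ hp
        rcases List.mem_cons.mp hmem with h | h
        · omega
        · have := hrest_lt p.1 h; omega


theorem pvFilterMap_enumerate_congr {alpha : Type} (F G : Int × alpha → Option alpha) :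
    ∀ (xs ys : List alpha) (s : Int), xs.length = ys.length →
      (∀ (k : Nat) (h : k < xs.length) (h' : k < ys.length), F (s + (k : Int), xs[k]) = G (s + (k : Int), ys[k])) →
      (PySem.List.enumerate xs s).filterMap F = (PySem.List.enumerate ys s).filterMap G := by
  intro xs
  induction xs with
  | nil => intro ys s hlen _; cases ys with
    | nil => rfl
    | cons y t => simp at hlen
  | cons x t ih =>
    intro ys s hlen hpt
    cases ys with
    | nil => simp at hlen
    | cons y u =>
      simp only [PySem.List.enumerate, List.filterMap_cons]
      have h0 : F (s, x) = G (s, y) := by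
        have := hpt 0 (by simp) (by simp)
        simpa using this
      rw [h0]
      have hrest : (PySem.List.enumerate t (s + 1)).filterMap F = (PySem.List.enumerate u (s + 1)).filterMap G := by
        apply ih u (s + 1) (by simpa using hlen)
        intro k hk hk'
        have := hpt (k + 1) (by simpa using Nat.succ_lt_succ hk) (by simpa using Nat.succ_lt_succ hk')
        have harith : s + ((k : Int) + 1) = s + 1 + (k : Int) := by ring
        simpa [harith] using this
      rw [hrest]



theorem pvRemoveAfter_nodup (docs : List (Int × Int)) (M w : Int) (hw : 0 < w)
    (r : Int) (hr0 : 0 ≤ r) (hrw : r ≤ w) :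
    (pvRemoveAfter docs M w (PySem.List.pyRange 0 r 1)).Nodup := by
  revert hrw
  induction r, hr0 using Int.le_induction with
  | base =>
    intro _
    rw [PySem.List.pyRange_one_eq_nil (le_refl 0)]
    exact List.nodup_nil
  | succ n hn ih =>
    intro hnw1
    rw [PySem.List.pyRange_one_succ_right hn, pvRemoveAfter_snoc]
    refine List.Nodup.append (ih (by omega)) ?_ ?_
    · exact ((pvIdxs_pairwise docs w n hw).imp (fun h => ne_of_lt h)).sublist
        (pvScan_rm_sublist docs M 0 (pvIdxs docs w n))
    · intro a ha ha2
      obtain ⟨rp, hrp, harp⟩ := pvRemoveAfter_mem docs M w _ a ha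
      have hb := PySem.List.mem_pyRange_one.mp hrp
      have han : a ∈ pvIdxs docs w n :=
        (pvScan_rm_sublist docs M 0 (pvIdxs docs w n)).subset ha2
      exact pvIdxs_disjoint docs w rp n a hw ⟨hb.1, by omega⟩ ⟨hn, by omega⟩
        (by omega) harp han

theorem pv_main : ∀ (document_indices : List (Int × Int)) (ddp_world_size : Int) (mini_batch : Int) (block_size : Int), Pre_drop_last_in_every_document_stream document_indices ddp_world_size mini_batch block_size → drop_last_in_every_document_stream document_indices ddp_world_size mini_batch block_size = drop_last_in_every_document_stream_alt document_indices ddp_world_size mini_batch block_size := by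
  intro di w mb bs hpre
  obtain ⟨hw1, _⟩ := hpre
  have hw : 0 < w := by omega
  unfold drop_last_in_every_document_stream drop_last_in_every_document_stream_alt
  simp only []
  cases hmin : PySem.List.min? (pvLengths di w) (fun x => x) with
  | none => rfl
  | some mn =>
    simp only []
    set M := mn - PySem.Int.mod mn (mb * bs) with hM
    have hrsmem : ∀ x ∈ PySem.List.pyRange 0 w 1, 0 ≤ x ∧ x < w := fun x hx => by
      have := PySem.List.mem_pyRange_one.mp hx; omega
    rw [pvPhase2A di M w hw w ⟨by omega, le_refl w⟩]
    rw [pvPhase2B di M w hw w ⟨by omega, le_refl w⟩]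
    simp only []
    set DF := pvDocsAfter di M w (PySem.List.pyRange 0 w 1) with hDF
    set RA := pvRemAfter di M w (PySem.List.pyRange 0 w 1) with hRA
    set RL := pvRemoveAfter di M w (PySem.List.pyRange 0 w 1) with hRL
    set RP := pvReplAfter di M w (PySem.List.pyRange 0 w 1) with hRP
    set S := PySem.List.sorted RA (fun x => x) true with hS
    have hperm : S.Perm RL :=
      (PySem.List.sorted_perm RA (fun x => x) true).trans (pvRemAfter_perm di M w _)
    have hRLnodup : RL.Nodup := pvRemoveAfter_nodup di M w hw w (by omega) (le_refl w)
    have hSnodup : S.Nodup := hperm.nodup_iff.mpr hRLnodup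
    have hSmem : ∀ i : Int, i ∈ S ↔ i ∈ RL := fun i => hperm.mem_iff
    have hDFlen : DF.length = di.length :=
      pvDocsAfter_length di M w (PySem.List.pyRange 0 w 1) hw hrsmem
    have hRLbounds : ∀ k ∈ RL, 0 ≤ k ∧ k < (di.length : Int) := by
      intro k hk
      obtain ⟨rp, hrp, hkrp⟩ := pvRemoveAfter_mem di M w _ k hk
      have hb := PySem.List.mem_pyRange_one.mp hrp
      have := (pvIdxs_mem di w rp k hw).mp hkrp
      exact ⟨by omega, this.2.1⟩
    have hdesc : S.Pairwise (fun a b => b < a) := by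
      have h1 := PySem.List.sorted_pairwise_rev RA (fun x => x)
      have h2 : S.Pairwise (fun a b : Int => a ≠ b) := hSnodup
      exact (h1.and h2).imp (fun h => lt_of_le_of_ne h.1 h.2.symm)
    rw [pvEraseDesc S DF hdesc ?bnd]
    case bnd =>
      intro k hk
      have := hRLbounds k ((hSmem k).mp hk)
      rw [hDFlen]
      exact this
    apply pvFilterMap_enumerate_congr _ _ DF di 0 hDFlen
    intro k hk hk2
    simp only [zero_add, PySem.Set.contains]
    by_cases hmem : (k : Int) ∈ RL
    · rw [if_pos ((hSmem (k : Int)).mpr hmem)]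
      rw [if_pos (List.contains_iff_mem.mpr hmem)]
    · rw [if_neg (fun h => hmem ((hSmem (k : Int)).mp h))]
      rw [if_neg (fun h => hmem (List.contains_iff_mem.mp h))]
      have hv := pvValue_eq di M w hw (PySem.List.pyRange 0 w 1) hrsmem (k : Int)
        (by omega) (by exact_mod_cast hk2)
      rw [PySem.List.pyGetD_eq_getElem DF (0,0) (by omega) (by exact_mod_cast hk)] at hv
      rw [PySem.List.pyGetD_eq_getElem di (0,0) (by omega) (by exact_mod_cast hk2)] at hv
      simp only [Int.toNat_natCast] at hv
      rw [hv]


-- ===== VERDICT (by name: the statement is the Claim_ definition above) =====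
theorem drop_last_in_every_document_stream_spec : Claim_equal_drop_last_in_every_document_stream := by
  intro di w mb bs _ hpre
  exact pv_main di w mb bs hpre
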